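-- pv_equiv track=rewrite | github.com/Team-inglo/NAMAMAP-AI | summary_pdf.py | find_page_range
-- ===== SOURCE A (Python) =====
-- def find_page_range(subtopic_title, pages):
--     """subtopic과 연관된 페이지 범위를 찾는 함수"""
--     start_page, end_page = None, None
--     for i, page_text in enumerate(pages):
--         if subtopic_title in page_text:
--             if start_page is None:
--                 start_page = i + 1  # 1부터 시작하는 페이지 번호
--             end_page = i + 1
--     return start_page or 1, end_page or start_page
-- ===== SOURCE B (Python) =====
-- def find_page_range(subtopic_title, pages):
--     """subtopic과 연관된 페이지 범위를 찾는 함수 (two short scans with early exit)"""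
--     first = None
--     for i, page_text in enumerate(pages):
--         if subtopic_title in page_text:
--             first = i + 1
--             break
--     last = None
--     for i, page_text in reversed(list(enumerate(pages))):
--         if subtopic_title in page_text:
--             last = i + 1
--             break
--     return first or 1, last or first
-- ===== Notes on version B (the rewrite author's own statement) =====
-- stated objective: alternative
-- what changed: Replaces the single accumulating pass that updates start/end on every match by two early-exit scans: a forward scan breaking on the first matching page and a backward scan breaking on the last, then the same 'or' defaults.
import Mathlib
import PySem

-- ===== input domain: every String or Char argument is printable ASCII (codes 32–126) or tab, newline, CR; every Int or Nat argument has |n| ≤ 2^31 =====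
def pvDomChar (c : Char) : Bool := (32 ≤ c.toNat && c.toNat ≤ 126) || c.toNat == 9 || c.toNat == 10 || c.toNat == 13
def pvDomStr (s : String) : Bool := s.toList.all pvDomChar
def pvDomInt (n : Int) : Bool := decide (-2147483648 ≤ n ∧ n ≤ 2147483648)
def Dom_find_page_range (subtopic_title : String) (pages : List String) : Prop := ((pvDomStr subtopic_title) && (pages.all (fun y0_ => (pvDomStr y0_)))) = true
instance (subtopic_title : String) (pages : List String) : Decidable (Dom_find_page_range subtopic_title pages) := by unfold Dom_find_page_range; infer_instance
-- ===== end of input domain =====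

-- ===== PORT A =====
-- B changes only the algorithm: two early-exit scans instead of one accumulating pass (return value only).
-- A: one pass updating (start_page, end_page) on every match, then `start or 1, end or start`.
def fprStepA (subtopic_title : String) (se : Option Int × Option Int) (ip : Int × String) :
    Option Int × Option Int :=
  if PySem.Str.isIn subtopic_title ip.2 then
    ((if se.1 = none then some (ip.1 + 1) else se.1), some (ip.1 + 1))
  else se

def find_page_range (subtopic_title : String) (pages : List String) : Int × Option Int :=
  let se := (PySem.List.enumerate pages 0).foldl (fprStepA subtopic_title) (none, none)
  ((match se.1 with | none => 1 | some v => if v ≠ 0 then v else 1),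
   (match se.2 with | none => se.1 | some v => if v ≠ 0 then some v else se.1))

-- ===== PORT B =====
-- one scan: first (index+1) whose page contains the title, or none (used forward and on the reverse)
def fprScan (subtopic_title : String) : List (Int × String) → Option Int
  | [] => none
  | (i, p) :: rest =>
    if PySem.Str.isIn subtopic_title p then some (i + 1) else fprScan subtopic_title rest

def find_page_range_alt (subtopic_title : String) (pages : List String) : Int × Option Int :=
  let first := fprScan subtopic_title (PySem.List.enumerate pages 0)
  let last := fprScan subtopic_title (PySem.List.enumerate pages 0).reverse
  ((match first with | none => 1 | some v => if v ≠ 0 then v else 1),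
   (match last with | none => first | some v => if v ≠ 0 then some v else first))

-- ===== PRECONDITION & SPEC =====
def Spec_find_page_range (subtopic_title : String) (pages : List String) (out : Int × Option Int) : Prop := out = find_page_range_alt subtopic_title pages
instance (subtopic_title : String) (pages : List String) (out : Int × Option Int) : Decidable (Spec_find_page_range subtopic_title pages out) := by unfold Spec_find_page_range; infer_instance

-- ===== CLAIM (what is proved, stated in full; the proofs are below) =====
def Claim_equal_find_page_range : Prop := ∀ (subtopic_title : String) (pages : List String), Dom_find_page_range subtopic_title pages → Spec_find_page_range subtopic_title pages (find_page_range subtopic_title pages)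

-- ===== LEMMAS AND PROOFS =====
theorem fprScan_append (t : String) (a b : List (Int × String)) :
    fprScan t (a ++ b) = (fprScan t a).orElse (fun _ => fprScan t b) := by
  induction a with
  | nil => rfl
  | cons ip rest ih =>
    obtain ⟨i, p⟩ := ip
    simp only [List.cons_append, fprScan]
    split <;> simp [ih]

theorem fprFold_eq (t : String) (l : List (Int × String)) (s e : Option Int) :
    l.foldl (fprStepA t) (s, e) =
      (s.orElse (fun _ => fprScan t l),
       (fprScan t l.reverse).orElse (fun _ => e)) := by
  induction l generalizing s e with
  | nil => simp [fprScan]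
  | cons ip rest ih =>
    obtain ⟨i, p⟩ := ip
    simp only [List.foldl_cons, fprStepA, fprScan, List.reverse_cons, fprScan_append]
    by_cases h : PySem.Str.isIn t p
    · simp only [h, if_pos, ih]
      cases s <;> cases fprScan t rest.reverse <;> simp
    · simp only [h, if_neg, ih, Bool.false_eq_true, not_false_iff]
      simp [fprScan]

-- ===== VERDICT (by name: the statement is the Claim_ definition above) =====
theorem find_page_range_spec : Claim_equal_find_page_range := by
  intro t pages _
  unfold Spec_find_page_range find_page_range find_page_range_alt
  rw [fprFold_eq]
  cases fprScan t (PySem.List.enumerate pages 0) <;>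
    cases fprScan t (PySem.List.enumerate pages 0).reverse <;> simp
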